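-- pv_equiv track=rewrite | github.com/changkun/life-simulator | life/utils.py | _orientations
-- ===== SOURCE A (Python) =====
-- def _normalise(cells):
--     """Shift a set of (r,c) tuples so the minimum row and column are 0."""
--     if not cells:
--         return frozenset()
--     min_r = min(r for r, c in cells)
--     min_c = min(c for r, c in cells)
--     return frozenset((r - min_r, c - min_c) for r, c in cells)
--
-- def _orientations(cells):
--     """Return all distinct orientations (rotations + reflections) of a pattern."""
--     fs = _normalise(cells)
--     seen = set()
--     results = []
--     cur = set(fs)
--     for _ in range(4):
--         for reflect in (False, True):
--             if reflect:
--                 oriented = frozenset((-r, c) for r, c in cur)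
--             else:
--                 oriented = frozenset(cur)
--             normed = _normalise(oriented)
--             if normed not in seen:
--                 seen.add(normed)
--                 results.append(normed)
--         # Rotate 90° clockwise: (r, c) -> (c, -r)
--         cur = {(c, -r) for r, c in cur}
--     return results
-- ===== SOURCE B (Python) =====
-- def _normalise(cells):
--     """Shift a set of (r,c) tuples so the minimum row and column are 0."""
--     if not cells:
--         return frozenset()
--     min_r = min(r for r, c in cells)
--     min_c = min(c for r, c in cells)
--     return frozenset((r - min_r, c - min_c) for r, c in cells)
--
-- # The dihedral group D4 as 2x2 integer matrices (a, b, c, d) acting by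
-- # (r, q) -> (a*r + b*q, c*r + d*q), listed in the orientation order
-- # identity, reflect, rot90, reflect.rot90, rot180, reflect.rot180, rot270, reflect.rot270.
-- _D4 = [(1, 0, 0, 1), (-1, 0, 0, 1), (0, 1, -1, 0), (0, -1, -1, 0),
--        (-1, 0, 0, -1), (1, 0, 0, -1), (0, -1, 1, 0), (0, 1, 1, 0)]
--
-- def _mul(M, N):
--     a, b, c, d = M
--     e, f, g, h = N
--     return (a * e + b * g, a * f + b * h, c * e + d * g, c * f + d * h)
--
-- def _orientations(cells):
--     """Distinct orientations by group theory: compute the stabiliser subgroup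
--     S = {N in D4 : N fixes the normalised pattern}, then emit orientation j
--     exactly when j is the least index in its coset M_j*S (two orientations
--     coincide iff their transforms lie in the same coset of S)."""
--     base = _normalise(cells)
--
--     def image(M):
--         a, b, c, d = M
--         return _normalise(frozenset((a * r + b * q, c * r + d * q) for r, q in base))
--
--     stab = [N for N in _D4 if image(N) == base]
--     out = []
--     for j, M in enumerate(_D4):
--         if min(_D4.index(_mul(M, N)) for N in stab) == j:
--             out.append(image(M))
--     return out
-- ===== Notes on version B (the rewrite author's own statement) =====
-- stated objective: alternative
-- what changed: B replaces A's generate-8-then-dedup-by-value loop by a group-theoretic computation: it first computes the stabiliser subgroup of the normalised pattern inside D4 (the transforms that fix it) and then emits orientation j exactly when j is the least index in its coset M_j*Stab, so no membership test against previously produced patterns is ever made.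
import Mathlib
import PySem

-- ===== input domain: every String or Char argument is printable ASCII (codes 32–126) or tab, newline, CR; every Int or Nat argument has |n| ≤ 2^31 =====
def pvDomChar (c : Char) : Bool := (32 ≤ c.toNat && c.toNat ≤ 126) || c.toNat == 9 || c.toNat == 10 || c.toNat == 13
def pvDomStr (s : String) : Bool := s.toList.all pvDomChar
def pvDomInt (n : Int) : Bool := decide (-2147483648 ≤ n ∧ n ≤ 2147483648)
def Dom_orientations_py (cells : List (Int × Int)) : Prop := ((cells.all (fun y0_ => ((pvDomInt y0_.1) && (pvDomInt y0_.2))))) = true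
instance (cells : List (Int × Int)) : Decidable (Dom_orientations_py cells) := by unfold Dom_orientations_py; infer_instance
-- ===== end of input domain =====

-- B replaces A's generate-then-dedup-by-value loop by a group-theoretic algorithm: it
-- computes the stabiliser subgroup of the normalised pattern inside the dihedral group D4
-- and emits orientation j exactly when j is the least index in its coset (objective:
-- alternative; same asymptotic cost). Every frozenset is represented canonically
-- (distinct elements in lexicographic order): a frozenset has no observable element
-- order and the inner lists are compared as sets.

-- Shared helper of BOTH Pythons (the two files carry the identical `_normalise`):
-- canonical representation of `frozenset(xs)`.
def pvCanon (xs : List (Int × Int)) : List (Int × Int) :=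
  PySem.List.sorted (PySem.Set.ofList xs) (fun p => toLex p) false

-- `_normalise(cells)` (identical in A's and B's source): shift so min row/col are 0.
def pvNormalise (cells : List (Int × Int)) : List (Int × Int) :=
  match cells with
  | [] => []
  | c :: t =>
    let minR := (t.map Prod.fst).foldl min c.1
    let minC := (t.map Prod.snd).foldl min c.2
    pvCanon ((c :: t).map (fun p => (p.1 - minR, p.2 - minC)))

-- ===== PORT A =====
-- one inner-loop step: state = (seen, results, cur), reflect ∈ {false, true}
def pvStepA (st : PySem.Set (List (Int × Int)) × List (List (Int × Int)) × List (Int × Int))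
    (reflect : Bool) :
    PySem.Set (List (Int × Int)) × List (List (Int × Int)) × List (Int × Int) :=
  let oriented := if reflect then pvCanon (st.2.2.map (fun p => (-p.1, p.2))) else pvCanon st.2.2
  let normed := pvNormalise oriented
  if !(PySem.Set.contains st.1 normed) then
    (PySem.Set.add st.1 normed, st.2.1 ++ [normed], st.2.2)
  else st

-- the `for _ in range(4)` loop of A, run on fs = the normalised pattern
def pvCoreA (fs : List (Int × Int)) : List (List (Int × Int)) :=
  ((PySem.List.pyRange 0 4 1).foldl
      (fun st _ =>
        let st2 := [false, true].foldl pvStepA st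
        (st2.1, st2.2.1, PySem.Set.ofList (st2.2.2.map (fun p => (p.2, -p.1)))))
      (PySem.Set.empty, ([] : List (List (Int × Int))), PySem.Set.ofList fs)).2.1

def orientations_py (cells : List (Int × Int)) : List (List (Int × Int)) :=
  pvCoreA (pvNormalise cells)

-- ===== PORT B =====
-- The dihedral group D4 as 2x2 integer matrices (a,b,c,d), in orientation order.
def pvD4 : List (Int × Int × Int × Int) :=
  [(1,0,0,1), (-1,0,0,1), (0,1,-1,0), (0,-1,-1,0),
   (-1,0,0,-1), (1,0,0,-1), (0,-1,1,0), (0,1,1,0)]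

def pvMul (M N : Int × Int × Int × Int) : Int × Int × Int × Int :=
  (M.1*N.1 + M.2.1*N.2.2.1, M.1*N.2.1 + M.2.1*N.2.2.2,
   M.2.2.1*N.1 + M.2.2.2*N.2.2.1, M.2.2.1*N.2.1 + M.2.2.2*N.2.2.2)

-- `image(M)` of Source B: the normalised image of the base pattern under M.
def pvImage (base : List (Int × Int)) (M : Int × Int × Int × Int) : List (Int × Int) :=
  pvNormalise (pvCanon (base.map (fun p => (M.1*p.1 + M.2.1*p.2, M.2.2.1*p.1 + M.2.2.2*p.2))))

-- `_D4.index(...)` always succeeds (D4 is closed under multiplication), so the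
-- `.getD 0` default of the ported `list.index` is unreachable.
def orientations_py_alt (cells : List (Int × Int)) : List (List (Int × Int)) :=
  let base := pvNormalise cells
  let stab := pvD4.filter (fun N => pvImage base N == base)
  (PySem.List.enumerate pvD4).foldl
    (fun out jM =>
      if PySem.List.min?
           (stab.map (fun N => (((PySem.List.index? pvD4 (pvMul jM.2 N)).getD 0 : Nat) : Int)))
           (fun x => x) == some jM.1
      then out ++ [pvImage base jM.2] else out)
    []

-- ===== PRECONDITION & SPEC =====
def Spec_orientations_py (cells : List (Int × Int)) (out : List (List (Int × Int))) : Prop := out = orientations_py_alt cells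
instance (cells : List (Int × Int)) (out : List (List (Int × Int))) : Decidable (Spec_orientations_py cells out) := by unfold Spec_orientations_py; infer_instance

-- ===== CLAIM (what is proved, stated in full; the proofs are below) =====
def Claim_equal_orientations_py : Prop := ∀ (cells : List (Int × Int)), Dom_orientations_py cells → Spec_orientations_py cells (orientations_py cells)


-- ===== LEMMAS AND PROOFS =====

lemma mem_pvCanon {x : Int × Int} {xs : List (Int × Int)} : x ∈ pvCanon xs ↔ x ∈ xs := by
  simp [pvCanon, PySem.List.mem_sorted, PySem.Set.mem_ofList]

lemma pvCanon_congr {xs ys : List (Int × Int)} (h : ∀ x, x ∈ xs ↔ x ∈ ys) :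
    pvCanon xs = pvCanon ys := by
  unfold pvCanon
  apply PySem.List.sorted_eq_sorted_of_perm _ _ _ (fun a b hab => toLex.injective hab)
  rw [List.perm_ext_iff_of_nodup (PySem.Set.nodup_ofList xs) (PySem.Set.nodup_ofList ys)]
  intro a; simp [PySem.Set.mem_ofList, h a]

lemma foldl_min_eq (a b : Int) (s t : List Int) (h : ∀ x, x ∈ a :: s ↔ x ∈ b :: t) :
    s.foldl min a = t.foldl min b := by
  have h1 := PySem.List.foldl_min_le s a
  have h2 := PySem.List.foldl_min_le t b
  have m1 := PySem.List.foldl_min_mem s a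
  have m2 := PySem.List.foldl_min_mem t b
  have hm1 : s.foldl min a ∈ b :: t := by
    rw [← h]; rcases m1 with h' | h' <;> simp [h']
  have hm2 : t.foldl min b ∈ a :: s := by
    rw [h]; rcases m2 with h' | h' <;> simp [h']
  apply le_antisymm
  · rcases List.mem_cons.1 hm2 with h' | h'
    · rw [h']; exact h1.1
    · exact h1.2 _ h'
  · rcases List.mem_cons.1 hm1 with h' | h'
    · rw [h']; exact h2.1
    · exact h2.2 _ h'

lemma pvNormalise_congr {xs ys : List (Int × Int)} (h : ∀ x, x ∈ xs ↔ x ∈ ys) :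
    pvNormalise xs = pvNormalise ys := by
  match xs, ys with
  | [], [] => rfl
  | [], b :: ys' => exact absurd ((h b).2 (by simp)) (by simp)
  | a :: xs', [] => exact absurd ((h a).1 (by simp)) (by simp)
  | a :: xs', b :: ys' =>
    have key1 : ∀ (x : Int), x ∈ (a :: xs').map Prod.fst ↔ x ∈ (b :: ys').map Prod.fst := by
      intro x; simp only [List.mem_map]
      constructor
      · rintro ⟨p, hp, rfl⟩; exact ⟨p, (h p).1 hp, rfl⟩
      · rintro ⟨p, hp, rfl⟩; exact ⟨p, (h p).2 hp, rfl⟩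
    have key2 : ∀ (x : Int), x ∈ (a :: xs').map Prod.snd ↔ x ∈ (b :: ys').map Prod.snd := by
      intro x; simp only [List.mem_map]
      constructor
      · rintro ⟨p, hp, rfl⟩; exact ⟨p, (h p).1 hp, rfl⟩
      · rintro ⟨p, hp, rfl⟩; exact ⟨p, (h p).2 hp, rfl⟩
    show pvCanon ((a :: xs').map (fun p =>
          (p.1 - (xs'.map Prod.fst).foldl min a.1, p.2 - (xs'.map Prod.snd).foldl min a.2)))
        = pvCanon ((b :: ys').map (fun p =>
          (p.1 - (ys'.map Prod.fst).foldl min b.1, p.2 - (ys'.map Prod.snd).foldl min b.2)))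
    rw [foldl_min_eq a.1 b.1 (xs'.map Prod.fst) (ys'.map Prod.fst) (fun x => by simpa using key1 x),
        foldl_min_eq a.2 b.2 (xs'.map Prod.snd) (ys'.map Prod.snd) (fun x => by simpa using key2 x)]
    apply pvCanon_congr
    intro x
    simp only [List.mem_map]
    constructor
    · rintro ⟨p, hp, rfl⟩; exact ⟨p, (h p).1 hp, rfl⟩
    · rintro ⟨p, hp, rfl⟩; exact ⟨p, (h p).2 hp, rfl⟩

lemma norm_canon (xs : List (Int × Int)) : pvNormalise (pvCanon xs) = pvNormalise xs :=
  pvNormalise_congr (fun _ => mem_pvCanon)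

-- the linear action of a matrix, named for the proofs (pvImage uses the same lambda)
def mApp (M : Int × Int × Int × Int) (p : Int × Int) : Int × Int :=
  (M.1*p.1 + M.2.1*p.2, M.2.2.1*p.1 + M.2.2.2*p.2)

def pvE : Int × Int × Int × Int := (1,0,0,1)

lemma mApp_mul (M N : Int × Int × Int × Int) (p : Int × Int) :
    mApp (pvMul M N) p = mApp M (mApp N p) := by
  simp only [mApp, pvMul, Prod.mk.injEq]; constructor <;> ring

lemma mApp_one (p : Int × Int) : mApp pvE p = p := by simp [mApp, pvE]

lemma mApp_sub (T : Int × Int × Int × Int) (x y : Int × Int) :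
    mApp T (x.1 - y.1, x.2 - y.2) = ((mApp T x).1 - (mApp T y).1, (mApp T x).2 - (mApp T y).2) := by
  simp only [mApp, Prod.mk.injEq]; constructor <;> ring

lemma foldl_min_add (l : List Int) (a k : Int) :
    (l.map (· + k)).foldl min (a + k) = l.foldl min a + k := by
  induction l generalizing a with
  | nil => rfl
  | cons x t ih =>
    simp only [List.map_cons, List.foldl_cons]
    rw [min_add_add_right]
    exact ih _

lemma norm_shift (xs : List (Int × Int)) (v : Int × Int) :
    pvNormalise (xs.map (fun p => (p.1 + v.1, p.2 + v.2))) = pvNormalise xs := by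
  match xs with
  | [] => rfl
  | a :: t =>
    show pvCanon (((a :: t).map (fun p => (p.1 + v.1, p.2 + v.2))).map (fun p =>
        (p.1 - ((t.map (fun p => (p.1 + v.1, p.2 + v.2))).map Prod.fst).foldl min (a.1 + v.1),
         p.2 - ((t.map (fun p => (p.1 + v.1, p.2 + v.2))).map Prod.snd).foldl min (a.2 + v.2))))
      = pvCanon ((a :: t).map (fun p =>
        (p.1 - (t.map Prod.fst).foldl min a.1, p.2 - (t.map Prod.snd).foldl min a.2)))
    have hr : (t.map (fun p => (p.1 + v.1, p.2 + v.2))).map Prod.fst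
        = (t.map Prod.fst).map (· + v.1) := by simp [List.map_map]
    have hc : (t.map (fun p => (p.1 + v.1, p.2 + v.2))).map Prod.snd
        = (t.map Prod.snd).map (· + v.2) := by simp [List.map_map]
    rw [hr, hc, foldl_min_add, foldl_min_add, List.map_map]
    exact congrArg pvCanon (List.map_congr_left (fun p _ => by
      simp only [Function.comp_apply, Prod.mk.injEq]
      constructor <;> ring))

lemma norm_rel (xs : List (Int × Int)) :
    ∃ v : Int × Int, ∀ p : Int × Int, p ∈ pvNormalise xs ↔ (p.1 - v.1, p.2 - v.2) ∈ xs := by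
  match xs with
  | [] => exact ⟨(0, 0), by simp [pvNormalise]⟩
  | a :: t =>
    refine ⟨(-(t.map Prod.fst).foldl min a.1, -(t.map Prod.snd).foldl min a.2), fun p => ?_⟩
    show p ∈ pvCanon ((a :: t).map (fun p =>
        (p.1 - (t.map Prod.fst).foldl min a.1, p.2 - (t.map Prod.snd).foldl min a.2))) ↔ _
    rw [mem_pvCanon, List.mem_map]
    constructor
    · rintro ⟨q, hq, rfl⟩; simpa using hq
    · intro hq; exact ⟨_, hq, by simp⟩

lemma rel_norm_eq {xs ys : List (Int × Int)} (v : Int × Int)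
    (h : ∀ p : Int × Int, p ∈ ys ↔ (p.1 - v.1, p.2 - v.2) ∈ xs) :
    pvNormalise xs = pvNormalise ys := by
  have hmem : ∀ p : Int × Int, p ∈ ys ↔ p ∈ xs.map (fun q => (q.1 + v.1, q.2 + v.2)) := by
    intro p
    rw [h p, List.mem_map]
    constructor
    · intro hq; exact ⟨_, hq, by simp⟩
    · rintro ⟨q, hq, rfl⟩; simpa using hq
  calc pvNormalise xs = pvNormalise (xs.map (fun q => (q.1 + v.1, q.2 + v.2))) :=
        (norm_shift xs v).symm
    _ = pvNormalise ys := pvNormalise_congr (fun x => (hmem x).symm)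

lemma norm_eq_rel {xs ys : List (Int × Int)} (h : pvNormalise xs = pvNormalise ys) :
    ∃ v : Int × Int, ∀ p : Int × Int, p ∈ ys ↔ (p.1 - v.1, p.2 - v.2) ∈ xs := by
  obtain ⟨u, hu⟩ := norm_rel xs
  obtain ⟨w, hw⟩ := norm_rel ys
  refine ⟨(u.1 - w.1, u.2 - w.2), fun p => ?_⟩
  have h1 : p ∈ ys ↔ (p.1 + w.1, p.2 + w.2) ∈ pvNormalise ys := by
    rw [hw]; simp
  rw [h1, ← h, hu]
  have : ((p.1 + w.1) - u.1, (p.2 + w.2) - u.2) = (p.1 - (u.1 - w.1), p.2 - (u.2 - w.2)) := by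
    simp only [Prod.mk.injEq]; constructor <;> ring
  rw [this]

lemma norm_idem (xs : List (Int × Int)) : pvNormalise (pvNormalise xs) = pvNormalise xs := by
  obtain ⟨v, hv⟩ := norm_rel xs
  exact (rel_norm_eq v hv).symm



-- ==== the key coset lemma: two orientations agree iff the connecting transform
-- ==== stabilises the (normalised) base pattern
lemma key_coset (M M' N K : Int × Int × Int × Int) (b : List (Int × Int))
    (hb : pvNormalise b = b)
    (h1 : pvMul M' M = pvE) (h2 : pvMul M M' = pvE) (h3 : pvMul M K = N) :
    (pvNormalise (b.map (mApp M)) = pvNormalise (b.map (mApp N)) ↔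
      pvNormalise (b.map (mApp K)) = b) := by
  have hM' : ∀ p, mApp M' (mApp M p) = p := fun p => by
    rw [← mApp_mul, h1, mApp_one]
  have hM2 : ∀ p, mApp M (mApp M' p) = p := fun p => by
    rw [← mApp_mul, h2, mApp_one]
  have hK : ∀ p, mApp M (mApp K p) = mApp N p := fun p => by
    rw [← mApp_mul, h3]
  have memM : ∀ (p : Int × Int), p ∈ b.map (mApp M) ↔ mApp M' p ∈ b := by
    intro p
    constructor
    · rintro hx
      rcases List.mem_map.1 hx with ⟨x, hx, rfl⟩
      rwa [hM']
    · intro hx; exact List.mem_map.2 ⟨mApp M' p, hx, hM2 p⟩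
  constructor
  · intro h
    obtain ⟨v, hv⟩ := norm_eq_rel h
    have step1 : ∀ q : Int × Int, q ∈ b.map (mApp K) ↔ mApp M q ∈ b.map (mApp N) := by
      intro q
      constructor
      · intro hq
        rcases List.mem_map.1 hq with ⟨x, hxb, hxe⟩
        exact List.mem_map.2 ⟨x, hxb, by rw [← hxe, hK]⟩
      · intro hq
        rcases List.mem_map.1 hq with ⟨x, hxb, hxe⟩
        refine List.mem_map.2 ⟨x, hxb, ?_⟩
        have := congrArg (mApp M') hxe
        rwa [← hK x, hM', hM'] at this
    have hh : pvNormalise b = pvNormalise (b.map (mApp K)) := by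
      refine rel_norm_eq (mApp M' v) fun q => ?_
      rw [step1 q, hv, memM, mApp_sub, hM']
    rw [← hh, hb]
  · intro h
    have h' : pvNormalise b = pvNormalise (b.map (mApp K)) := by rw [h, hb]
    obtain ⟨v, hv⟩ := norm_eq_rel h'
    refine rel_norm_eq (mApp M v) fun p => ?_
    have step1 : p ∈ b.map (mApp N) ↔ mApp M' p ∈ b.map (mApp K) := by
      constructor
      · intro hp
        rcases List.mem_map.1 hp with ⟨x, hxb, hxe⟩
        refine List.mem_map.2 ⟨x, hxb, ?_⟩
        have := congrArg (mApp M') (hK x)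
        rw [hM'] at this
        rw [this, hxe]
      · intro hp
        rcases List.mem_map.1 hp with ⟨x, hxb, hxe⟩
        refine List.mem_map.2 ⟨x, hxb, ?_⟩
        have := congrArg (mApp M) hxe
        rwa [hK, hM2] at this
    rw [step1, hv, memM]
    have harith : mApp M' (p.1 - (mApp M v).1, p.2 - (mApp M v).2)
        = ((mApp M' p).1 - v.1, (mApp M' p).2 - v.2) := by
      rw [mApp_sub, hM']
    rw [harith]

-- c j: the j-th orientation of the (already normalised) base pattern
def pvOri (base : List (Int × Int)) (j : Nat) : List (Int × Int) :=
  pvNormalise (base.map (mApp (pvD4.getD j pvE)))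

lemma img_eq_ori (base : List (Int × Int)) (j : Nat) :
    pvImage base (pvD4.getD j pvE) = pvOri base j := by
  show pvNormalise (pvCanon (base.map (mApp (pvD4.getD j pvE)))) = _
  rw [norm_canon]; rfl

lemma ori_zero (base : List (Int × Int)) (hb : pvNormalise base = base) :
    pvOri base 0 = base := by
  show pvNormalise (base.map (mApp pvE)) = base
  rw [show base.map (mApp pvE) = base from by
    rw [List.map_congr_left (fun p _ => mApp_one p)]; exact List.map_id base, hb]


lemma min?_int_eq_some_iff_of_mem (L : List Int) (m : Int) (hm : m ∈ L) :
    (PySem.List.min? L (fun x => x) = some m) ↔ ∀ y ∈ L, m ≤ y := by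
  constructor
  · intro h y hy; exact PySem.List.min?_isMin h y hy
  · intro h
    cases hmin : PySem.List.min? L (fun x => x) with
    | none =>
      have : L = [] := (PySem.List.min?_eq_none_iff L (fun x => x)).mp hmin
      subst this; cases hm
    | some m' =>
      have h1 : m' ≤ m := PySem.List.min?_isMin hmin m hm
      have h2 : m ≤ m' := h m' (PySem.List.min?_mem hmin)
      rw [le_antisymm h1 h2]

lemma exists_first {α : Type} [DecidableEq α] (c : Nat → α) (x : α) (n : Nat)
    (h : ∃ i, i < n ∧ c i = x) :
    ∃ j, (j < n ∧ c j = x) ∧ ∀ i, i < j → c i ≠ x := by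
  refine ⟨Nat.find h, Nat.find_spec h, fun i hij hc => ?_⟩
  exact Nat.find_min h hij ⟨lt_trans hij (Nat.find_spec h).1, hc⟩

def pvKeep (c : Nat → List (Int × Int)) (j : Nat) : Bool := decide (∀ i, i < j → c i ≠ c j)

lemma dedup_eq (c : Nat → List (Int × Int)) (n : Nat) :
    (List.range n).foldl (fun r j => if c j ∈ r then r else r ++ [c j]) ([] : List (List (Int × Int)))
    = ((List.range n).filter (fun j => pvKeep c j)).map c := by
  induction n with
  | zero => rfl
  | succ m ih =>
    rw [List.range_succ, List.foldl_append, List.filter_append, List.map_append, ih]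
    simp only [List.foldl_cons, List.foldl_nil, List.filter_cons, List.filter_nil]
    by_cases hmem : c m ∈ ((List.range m).filter (fun j => pvKeep c j)).map c
    · have hnot : ¬ (∀ i, i < m → c i ≠ c m) := by
        rcases List.mem_map.1 hmem with ⟨j, hj, hcj⟩
        have hjm := List.mem_range.1 (List.mem_filter.1 hj).1
        exact fun hall => hall j hjm hcj
      rw [if_pos hmem, if_neg (by simpa [pvKeep] using hnot)]; simp
    · have hall : ∀ i, i < m → c i ≠ c m := by
        intro i him hci
        obtain ⟨j, ⟨hjm, hcj⟩, hfirst⟩ := exists_first c (c m) m ⟨i, him, hci⟩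
        exact hmem (List.mem_map.2 ⟨j, List.mem_filter.2 ⟨List.mem_range.2 hjm, by
          simp only [pvKeep, decide_eq_true_eq]
          intro i' hi' he; exact hfirst i' hi' (he.trans hcj)⟩, hcj⟩)
      rw [if_neg hmem, if_pos (by simpa [pvKeep] using hall)]; simp

-- one dedup insertion (the shape of A's seen/results update once the lockstep is exposed)
def pvIns (res : List (List (Int × Int))) (n : List (Int × Int)) : List (List (Int × Int)) :=
  if !(res.contains n) then res ++ [n] else res

lemma pvIns_eq (res : List (List (Int × Int))) (n : List (Int × Int)) :
    pvIns res n = if n ∈ res then res else res ++ [n] := by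
  by_cases h : n ∈ res <;> simp [pvIns, h]

lemma stepA_false (r : List (List (Int × Int))) (cur : List (Int × Int)) :
    pvStepA (r, r, cur) false =
      (pvIns r (pvNormalise (pvCanon cur)), pvIns r (pvNormalise (pvCanon cur)), cur) := by
  by_cases h : pvNormalise (pvCanon cur) ∈ r <;>
    simp [pvStepA, pvIns, PySem.Set.add, PySem.Set.contains, h]

lemma stepA_true (r : List (List (Int × Int))) (cur : List (Int × Int)) :
    pvStepA (r, r, cur) true =
      (pvIns r (pvNormalise (pvCanon (cur.map (fun p => (-p.1, p.2))))),
       pvIns r (pvNormalise (pvCanon (cur.map (fun p => (-p.1, p.2))))), cur) := by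
  by_cases h : pvNormalise (pvCanon (cur.map (fun p => (-p.1, p.2)))) ∈ r <;>
    simp [pvStepA, pvIns, PySem.Set.add, PySem.Set.contains, h]


lemma pvCand_congr {xs ys : List (Int × Int)} (h : ∀ x, x ∈ xs ↔ x ∈ ys) :
    pvNormalise (pvCanon xs) = pvNormalise (pvCanon ys) :=
  pvNormalise_congr (fun x => by rw [mem_pvCanon, mem_pvCanon]; exact h x)

lemma cand_0 (fs : List (Int × Int)) :
    pvNormalise (pvCanon (fs.map (fun p => (p.1, p.2)))) = pvOri fs 0 := by
  rw [show pvOri fs 0 = pvNormalise (fs.map (mApp ((1:Int),(0:Int),(0:Int),(1:Int)))) from rfl, ← norm_canon (fs.map (mApp ((1:Int),(0:Int),(0:Int),(1:Int))))]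
  exact congrArg pvNormalise (congrArg pvCanon (List.map_congr_left (fun p _ => by
    simp only [mApp, Prod.mk.injEq]; constructor <;> ring)))

lemma cand_1 (fs : List (Int × Int)) :
    pvNormalise (pvCanon (fs.map (fun p => (-p.1, p.2)))) = pvOri fs 1 := by
  rw [show pvOri fs 1 = pvNormalise (fs.map (mApp ((-1:Int),(0:Int),(0:Int),(1:Int)))) from rfl, ← norm_canon (fs.map (mApp ((-1:Int),(0:Int),(0:Int),(1:Int))))]
  exact congrArg pvNormalise (congrArg pvCanon (List.map_congr_left (fun p _ => by
    simp only [mApp, Prod.mk.injEq]; constructor <;> ring)))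

lemma cand_2 (fs : List (Int × Int)) :
    pvNormalise (pvCanon (fs.map (fun p => (p.2, -p.1)))) = pvOri fs 2 := by
  rw [show pvOri fs 2 = pvNormalise (fs.map (mApp ((0:Int),(1:Int),(-1:Int),(0:Int)))) from rfl, ← norm_canon (fs.map (mApp ((0:Int),(1:Int),(-1:Int),(0:Int))))]
  exact congrArg pvNormalise (congrArg pvCanon (List.map_congr_left (fun p _ => by
    simp only [mApp, Prod.mk.injEq]; constructor <;> ring)))

lemma cand_3 (fs : List (Int × Int)) :
    pvNormalise (pvCanon (fs.map (fun p => (-p.2, -p.1)))) = pvOri fs 3 := by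
  rw [show pvOri fs 3 = pvNormalise (fs.map (mApp ((0:Int),(-1:Int),(-1:Int),(0:Int)))) from rfl, ← norm_canon (fs.map (mApp ((0:Int),(-1:Int),(-1:Int),(0:Int))))]
  exact congrArg pvNormalise (congrArg pvCanon (List.map_congr_left (fun p _ => by
    simp only [mApp, Prod.mk.injEq]; constructor <;> ring)))

lemma cand_4 (fs : List (Int × Int)) :
    pvNormalise (pvCanon (fs.map (fun p => (-p.1, -p.2)))) = pvOri fs 4 := by
  rw [show pvOri fs 4 = pvNormalise (fs.map (mApp ((-1:Int),(0:Int),(0:Int),(-1:Int)))) from rfl, ← norm_canon (fs.map (mApp ((-1:Int),(0:Int),(0:Int),(-1:Int))))]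
  exact congrArg pvNormalise (congrArg pvCanon (List.map_congr_left (fun p _ => by
    simp only [mApp, Prod.mk.injEq]; constructor <;> ring)))

lemma cand_5 (fs : List (Int × Int)) :
    pvNormalise (pvCanon (fs.map (fun p => (p.1, -p.2)))) = pvOri fs 5 := by
  rw [show pvOri fs 5 = pvNormalise (fs.map (mApp ((1:Int),(0:Int),(0:Int),(-1:Int)))) from rfl, ← norm_canon (fs.map (mApp ((1:Int),(0:Int),(0:Int),(-1:Int))))]
  exact congrArg pvNormalise (congrArg pvCanon (List.map_congr_left (fun p _ => by
    simp only [mApp, Prod.mk.injEq]; constructor <;> ring)))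

lemma cand_6 (fs : List (Int × Int)) :
    pvNormalise (pvCanon (fs.map (fun p => (-p.2, p.1)))) = pvOri fs 6 := by
  rw [show pvOri fs 6 = pvNormalise (fs.map (mApp ((0:Int),(-1:Int),(1:Int),(0:Int)))) from rfl, ← norm_canon (fs.map (mApp ((0:Int),(-1:Int),(1:Int),(0:Int))))]
  exact congrArg pvNormalise (congrArg pvCanon (List.map_congr_left (fun p _ => by
    simp only [mApp, Prod.mk.injEq]; constructor <;> ring)))

lemma cand_7 (fs : List (Int × Int)) :
    pvNormalise (pvCanon (fs.map (fun p => (p.2, p.1)))) = pvOri fs 7 := by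
  rw [show pvOri fs 7 = pvNormalise (fs.map (mApp ((0:Int),(1:Int),(1:Int),(0:Int)))) from rfl, ← norm_canon (fs.map (mApp ((0:Int),(1:Int),(1:Int),(0:Int))))]
  exact congrArg pvNormalise (congrArg pvCanon (List.map_congr_left (fun p _ => by
    simp only [mApp, Prod.mk.injEq]; constructor <;> ring)))

set_option maxHeartbeats 2000000 in
lemma coreA_eq (fs : List (Int × Int)) :
    pvCoreA fs
    = (List.range 8).foldl (fun r j => if pvOri fs j ∈ r then r else r ++ [pvOri fs j]) [] := by
  unfold pvCoreA
  rw [show PySem.List.pyRange 0 4 1 = [0, 1, 2, 3] from by decide]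
  simp only [List.foldl, PySem.Set.empty, stepA_false, stepA_true]
  have hc1 : pvNormalise (pvCanon (PySem.Set.ofList fs))
      = pvOri fs 0 :=
    (pvCand_congr (by intro x; simp [PySem.Set.mem_ofList])).trans (cand_0 fs)
  have hc2 : pvNormalise (pvCanon (List.map (fun (p : Int × Int) => (-p.1, p.2)) (PySem.Set.ofList fs)))
      = pvOri fs 1 :=
    (pvCand_congr (by intro x; simp [PySem.Set.mem_ofList, List.mem_map])).trans (cand_1 fs)
  have hc3 : pvNormalise (pvCanon (PySem.Set.ofList (List.map (fun (p : Int × Int) => (p.2, -p.1)) (PySem.Set.ofList fs))))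
      = pvOri fs 2 :=
    (pvCand_congr (by intro x; simp [PySem.Set.mem_ofList, List.mem_map])).trans (cand_2 fs)
  have hc4 : pvNormalise (pvCanon (List.map (fun (p : Int × Int) => (-p.1, p.2))
        (PySem.Set.ofList (List.map (fun (p : Int × Int) => (p.2, -p.1)) (PySem.Set.ofList fs)))))
      = pvOri fs 3 :=
    (pvCand_congr (by
      intro x; simp [PySem.Set.mem_ofList, List.mem_map]
      constructor <;> rintro ⟨a, b, h1, h2⟩ <;> exact ⟨b, a, h1, h2⟩)).trans (cand_3 fs)
  have hc5 : pvNormalise (pvCanon (PySem.Set.ofList (List.map (fun (p : Int × Int) => (p.2, -p.1))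
        (PySem.Set.ofList (List.map (fun (p : Int × Int) => (p.2, -p.1)) (PySem.Set.ofList fs))))))
      = pvOri fs 4 :=
    (pvCand_congr (by
      intro x; simp [PySem.Set.mem_ofList, List.mem_map]
      constructor <;> rintro ⟨a, b, h1, h2⟩ <;> exact ⟨b, a, h1, h2⟩)).trans (cand_4 fs)
  have hc6 : pvNormalise (pvCanon (List.map (fun (p : Int × Int) => (-p.1, p.2))
        (PySem.Set.ofList (List.map (fun (p : Int × Int) => (p.2, -p.1))
          (PySem.Set.ofList (List.map (fun (p : Int × Int) => (p.2, -p.1)) (PySem.Set.ofList fs)))))))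
      = pvOri fs 5 :=
    (pvCand_congr (by
      intro x; simp [PySem.Set.mem_ofList, List.mem_map]
      constructor <;> rintro ⟨a, b, h1, h2⟩ <;> exact ⟨b, a, h1, h2⟩)).trans (cand_5 fs)
  have hc7 : pvNormalise (pvCanon (PySem.Set.ofList (List.map (fun (p : Int × Int) => (p.2, -p.1))
        (PySem.Set.ofList (List.map (fun (p : Int × Int) => (p.2, -p.1))
          (PySem.Set.ofList (List.map (fun (p : Int × Int) => (p.2, -p.1)) (PySem.Set.ofList fs))))))))
      = pvOri fs 6 :=
    (pvCand_congr (by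
      intro x; simp [PySem.Set.mem_ofList, List.mem_map]
      constructor <;> rintro ⟨a, b, h1, h2⟩ <;> exact ⟨b, a, h1, h2⟩)).trans (cand_6 fs)
  have hc8 : pvNormalise (pvCanon (List.map (fun (p : Int × Int) => (-p.1, p.2))
        (PySem.Set.ofList (List.map (fun (p : Int × Int) => (p.2, -p.1))
          (PySem.Set.ofList (List.map (fun (p : Int × Int) => (p.2, -p.1))
            (PySem.Set.ofList (List.map (fun (p : Int × Int) => (p.2, -p.1)) (PySem.Set.ofList fs)))))))))
      = pvOri fs 7 :=
    (pvCand_congr (by intro x; simp [PySem.Set.mem_ofList, List.mem_map])).trans (cand_7 fs)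
  rw [hc1, hc2, hc3, hc4, hc5, hc6, hc7, hc8]
  rw [show List.range 8 = [0, 1, 2, 3, 4, 5, 6, 7] from by decide]
  simp only [List.foldl, ← pvIns_eq]

lemma ori_key (base : List (Int × Int)) (hb : pvNormalise base = base) (i i' j k : Nat)
    (h1 : pvMul (pvD4.getD i' pvE) (pvD4.getD i pvE) = pvE)
    (h2 : pvMul (pvD4.getD i pvE) (pvD4.getD i' pvE) = pvE)
    (h3 : pvMul (pvD4.getD i pvE) (pvD4.getD k pvE) = pvD4.getD j pvE) :
    (pvOri base i = pvOri base j ↔ pvOri base k = base) :=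
  key_coset _ _ _ _ base hb h1 h2 h3

lemma ori_swap (base : List (Int × Int)) (hb : pvNormalise base = base) :
    (pvOri base 2 = base ↔ pvOri base 6 = base) := by
  have h26 := ori_key base hb 2 6 0 6 (by decide) (by decide) (by decide)
  rwa [ori_zero base hb] at h26

set_option maxHeartbeats 1000000 in
lemma cond_0 (base : List (Int × Int)) (hb : pvNormalise base = base) :
    (PySem.List.min? ((pvD4.filter (fun N => pvImage base N == base)).map
        (fun N => (((PySem.List.index? pvD4 (pvMul ((1:Int),(0:Int),(0:Int),(1:Int)) N)).getD 0 : Nat) : Int))) (fun x => x) == some 0)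
    = pvKeep (pvOri base) 0 := by
  have hs0 : (pvImage base ((1:Int),(0:Int),(0:Int),(1:Int)) == base) = true :=
    beq_iff_eq.mpr (by rw [show pvImage base ((1:Int),(0:Int),(0:Int),(1:Int)) = pvOri base 0 from img_eq_ori base 0]; exact ori_zero base hb)
  have hmemj : ((0:Int)) ∈ (pvD4.filter (fun N => pvImage base N == base)).map
      (fun N => (((PySem.List.index? pvD4 (pvMul ((1:Int),(0:Int),(0:Int),(1:Int)) N)).getD 0 : Nat) : Int)) :=
    List.mem_map.2 ⟨((1:Int),(0:Int),(0:Int),(1:Int)), List.mem_filter.2 ⟨by decide, hs0⟩, by decide⟩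
  apply Bool.coe_iff_coe.mp
  rw [beq_iff_eq, min?_int_eq_some_iff_of_mem _ _ hmemj]
  simp only [pvKeep, decide_eq_true_eq]
  constructor
  · intro hmin i hi
    exact absurd hi (Nat.not_lt_zero i)
  · intro hA y hy
    rcases List.mem_map.1 hy with ⟨N, hNf, rfl⟩
    have hNd := (List.mem_filter.1 hNf).1
    have hNs := (List.mem_filter.1 hNf).2
    simp only [pvD4, List.mem_cons, List.not_mem_nil, or_false] at hNd
    rcases hNd with rfl | rfl | rfl | rfl | rfl | rfl | rfl | rfl
    · exact by decide
    · exact by decide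
    · exact by decide
    · exact by decide
    · exact by decide
    · exact by decide
    · exact by decide
    · exact by decide

set_option maxHeartbeats 1000000 in
lemma cond_1 (base : List (Int × Int)) (hb : pvNormalise base = base) :
    (PySem.List.min? ((pvD4.filter (fun N => pvImage base N == base)).map
        (fun N => (((PySem.List.index? pvD4 (pvMul ((-1:Int),(0:Int),(0:Int),(1:Int)) N)).getD 0 : Nat) : Int))) (fun x => x) == some 1)
    = pvKeep (pvOri base) 1 := by
  have hs0 : (pvImage base ((1:Int),(0:Int),(0:Int),(1:Int)) == base) = true :=
    beq_iff_eq.mpr (by rw [show pvImage base ((1:Int),(0:Int),(0:Int),(1:Int)) = pvOri base 0 from img_eq_ori base 0]; exact ori_zero base hb)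
  have hmemj : ((1:Int)) ∈ (pvD4.filter (fun N => pvImage base N == base)).map
      (fun N => (((PySem.List.index? pvD4 (pvMul ((-1:Int),(0:Int),(0:Int),(1:Int)) N)).getD 0 : Nat) : Int)) :=
    List.mem_map.2 ⟨((1:Int),(0:Int),(0:Int),(1:Int)), List.mem_filter.2 ⟨by decide, hs0⟩, by decide⟩
  have hsb1 : ((pvImage base ((-1:Int),(0:Int),(0:Int),(1:Int)) == base) = true) ↔ pvOri base 1 = base := by
    rw [show pvImage base ((-1:Int),(0:Int),(0:Int),(1:Int)) = pvOri base 1 from img_eq_ori base 1]; exact beq_iff_eq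
  have hk0 : pvOri base 0 = pvOri base 1 ↔ pvOri base 1 = base :=
    ori_key base hb 0 0 1 1 (by decide) (by decide) (by decide)
  apply Bool.coe_iff_coe.mp
  rw [beq_iff_eq, min?_int_eq_some_iff_of_mem _ _ hmemj]
  simp only [pvKeep, decide_eq_true_eq]
  constructor
  · intro hmin i hi
    interval_cases i
    · intro he
      have hsm : pvOri base 1 = base := hk0.mp he
      have hy := hmin ((0:Int)) (List.mem_map.2 ⟨((-1:Int),(0:Int),(0:Int),(1:Int)),
        List.mem_filter.2 ⟨by decide, hsb1.mpr hsm⟩, by decide⟩)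
      exact absurd hy (by decide)
  · intro hA y hy
    rcases List.mem_map.1 hy with ⟨N, hNf, rfl⟩
    have hNd := (List.mem_filter.1 hNf).1
    have hNs := (List.mem_filter.1 hNf).2
    simp only [pvD4, List.mem_cons, List.not_mem_nil, or_false] at hNd
    rcases hNd with rfl | rfl | rfl | rfl | rfl | rfl | rfl | rfl
    · exact by decide
    · exfalso
      have hsm : pvOri base 1 = base := hsb1.mp hNs
      exact hA 0 (by norm_num) (hk0.mpr (hsm))
    · exact by decide
    · exact by decide
    · exact by decide
    · exact by decide
    · exact by decide
    · exact by decide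

set_option maxHeartbeats 1000000 in
lemma cond_2 (base : List (Int × Int)) (hb : pvNormalise base = base) :
    (PySem.List.min? ((pvD4.filter (fun N => pvImage base N == base)).map
        (fun N => (((PySem.List.index? pvD4 (pvMul ((0:Int),(1:Int),(-1:Int),(0:Int)) N)).getD 0 : Nat) : Int))) (fun x => x) == some 2)
    = pvKeep (pvOri base) 2 := by
  have hs0 : (pvImage base ((1:Int),(0:Int),(0:Int),(1:Int)) == base) = true :=
    beq_iff_eq.mpr (by rw [show pvImage base ((1:Int),(0:Int),(0:Int),(1:Int)) = pvOri base 0 from img_eq_ori base 0]; exact ori_zero base hb)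
  have hmemj : ((2:Int)) ∈ (pvD4.filter (fun N => pvImage base N == base)).map
      (fun N => (((PySem.List.index? pvD4 (pvMul ((0:Int),(1:Int),(-1:Int),(0:Int)) N)).getD 0 : Nat) : Int)) :=
    List.mem_map.2 ⟨((1:Int),(0:Int),(0:Int),(1:Int)), List.mem_filter.2 ⟨by decide, hs0⟩, by decide⟩
  have hsb3 : ((pvImage base ((0:Int),(-1:Int),(-1:Int),(0:Int)) == base) = true) ↔ pvOri base 3 = base := by
    rw [show pvImage base ((0:Int),(-1:Int),(-1:Int),(0:Int)) = pvOri base 3 from img_eq_ori base 3]; exact beq_iff_eq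
  have hsb6 : ((pvImage base ((0:Int),(-1:Int),(1:Int),(0:Int)) == base) = true) ↔ pvOri base 6 = base := by
    rw [show pvImage base ((0:Int),(-1:Int),(1:Int),(0:Int)) = pvOri base 6 from img_eq_ori base 6]; exact beq_iff_eq
  have hk0 : pvOri base 0 = pvOri base 2 ↔ pvOri base 2 = base :=
    ori_key base hb 0 0 2 2 (by decide) (by decide) (by decide)
  have hk1 : pvOri base 1 = pvOri base 2 ↔ pvOri base 3 = base :=
    ori_key base hb 1 1 2 3 (by decide) (by decide) (by decide)
  have hswap := ori_swap base hb
  apply Bool.coe_iff_coe.mp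
  rw [beq_iff_eq, min?_int_eq_some_iff_of_mem _ _ hmemj]
  simp only [pvKeep, decide_eq_true_eq]
  constructor
  · intro hmin i hi
    interval_cases i
    · intro he
      have hsm : pvOri base 6 = base := hswap.mp (hk0.mp he)
      have hy := hmin ((0:Int)) (List.mem_map.2 ⟨((0:Int),(-1:Int),(1:Int),(0:Int)),
        List.mem_filter.2 ⟨by decide, hsb6.mpr hsm⟩, by decide⟩)
      exact absurd hy (by decide)
    · intro he
      have hsm : pvOri base 3 = base := hk1.mp he
      have hy := hmin ((1:Int)) (List.mem_map.2 ⟨((0:Int),(-1:Int),(-1:Int),(0:Int)),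
        List.mem_filter.2 ⟨by decide, hsb3.mpr hsm⟩, by decide⟩)
      exact absurd hy (by decide)
  · intro hA y hy
    rcases List.mem_map.1 hy with ⟨N, hNf, rfl⟩
    have hNd := (List.mem_filter.1 hNf).1
    have hNs := (List.mem_filter.1 hNf).2
    simp only [pvD4, List.mem_cons, List.not_mem_nil, or_false] at hNd
    rcases hNd with rfl | rfl | rfl | rfl | rfl | rfl | rfl | rfl
    · exact by decide
    · exact by decide
    · exact by decide
    · exfalso
      have hsm : pvOri base 3 = base := hsb3.mp hNs
      exact hA 1 (by norm_num) (hk1.mpr (hsm))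
    · exact by decide
    · exact by decide
    · exfalso
      have hsm : pvOri base 6 = base := hsb6.mp hNs
      exact hA 0 (by norm_num) (hk0.mpr (hswap.mpr hsm))
    · exact by decide

set_option maxHeartbeats 1000000 in
lemma cond_3 (base : List (Int × Int)) (hb : pvNormalise base = base) :
    (PySem.List.min? ((pvD4.filter (fun N => pvImage base N == base)).map
        (fun N => (((PySem.List.index? pvD4 (pvMul ((0:Int),(-1:Int),(-1:Int),(0:Int)) N)).getD 0 : Nat) : Int))) (fun x => x) == some 3)
    = pvKeep (pvOri base) 3 := by
  have hs0 : (pvImage base ((1:Int),(0:Int),(0:Int),(1:Int)) == base) = true :=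
    beq_iff_eq.mpr (by rw [show pvImage base ((1:Int),(0:Int),(0:Int),(1:Int)) = pvOri base 0 from img_eq_ori base 0]; exact ori_zero base hb)
  have hmemj : ((3:Int)) ∈ (pvD4.filter (fun N => pvImage base N == base)).map
      (fun N => (((PySem.List.index? pvD4 (pvMul ((0:Int),(-1:Int),(-1:Int),(0:Int)) N)).getD 0 : Nat) : Int)) :=
    List.mem_map.2 ⟨((1:Int),(0:Int),(0:Int),(1:Int)), List.mem_filter.2 ⟨by decide, hs0⟩, by decide⟩
  have hsb3 : ((pvImage base ((0:Int),(-1:Int),(-1:Int),(0:Int)) == base) = true) ↔ pvOri base 3 = base := by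
    rw [show pvImage base ((0:Int),(-1:Int),(-1:Int),(0:Int)) = pvOri base 3 from img_eq_ori base 3]; exact beq_iff_eq
  have hsb5 : ((pvImage base ((1:Int),(0:Int),(0:Int),(-1:Int)) == base) = true) ↔ pvOri base 5 = base := by
    rw [show pvImage base ((1:Int),(0:Int),(0:Int),(-1:Int)) = pvOri base 5 from img_eq_ori base 5]; exact beq_iff_eq
  have hsb6 : ((pvImage base ((0:Int),(-1:Int),(1:Int),(0:Int)) == base) = true) ↔ pvOri base 6 = base := by
    rw [show pvImage base ((0:Int),(-1:Int),(1:Int),(0:Int)) = pvOri base 6 from img_eq_ori base 6]; exact beq_iff_eq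
  have hk0 : pvOri base 0 = pvOri base 3 ↔ pvOri base 3 = base :=
    ori_key base hb 0 0 3 3 (by decide) (by decide) (by decide)
  have hk1 : pvOri base 1 = pvOri base 3 ↔ pvOri base 2 = base :=
    ori_key base hb 1 1 3 2 (by decide) (by decide) (by decide)
  have hk2 : pvOri base 2 = pvOri base 3 ↔ pvOri base 5 = base :=
    ori_key base hb 2 6 3 5 (by decide) (by decide) (by decide)
  have hswap := ori_swap base hb
  apply Bool.coe_iff_coe.mp
  rw [beq_iff_eq, min?_int_eq_some_iff_of_mem _ _ hmemj]
  simp only [pvKeep, decide_eq_true_eq]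
  constructor
  · intro hmin i hi
    interval_cases i
    · intro he
      have hsm : pvOri base 3 = base := hk0.mp he
      have hy := hmin ((0:Int)) (List.mem_map.2 ⟨((0:Int),(-1:Int),(-1:Int),(0:Int)),
        List.mem_filter.2 ⟨by decide, hsb3.mpr hsm⟩, by decide⟩)
      exact absurd hy (by decide)
    · intro he
      have hsm : pvOri base 6 = base := hswap.mp (hk1.mp he)
      have hy := hmin ((1:Int)) (List.mem_map.2 ⟨((0:Int),(-1:Int),(1:Int),(0:Int)),
        List.mem_filter.2 ⟨by decide, hsb6.mpr hsm⟩, by decide⟩)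
      exact absurd hy (by decide)
    · intro he
      have hsm : pvOri base 5 = base := hk2.mp he
      have hy := hmin ((2:Int)) (List.mem_map.2 ⟨((1:Int),(0:Int),(0:Int),(-1:Int)),
        List.mem_filter.2 ⟨by decide, hsb5.mpr hsm⟩, by decide⟩)
      exact absurd hy (by decide)
  · intro hA y hy
    rcases List.mem_map.1 hy with ⟨N, hNf, rfl⟩
    have hNd := (List.mem_filter.1 hNf).1
    have hNs := (List.mem_filter.1 hNf).2
    simp only [pvD4, List.mem_cons, List.not_mem_nil, or_false] at hNd
    rcases hNd with rfl | rfl | rfl | rfl | rfl | rfl | rfl | rfl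
    · exact by decide
    · exact by decide
    · exact by decide
    · exfalso
      have hsm : pvOri base 3 = base := hsb3.mp hNs
      exact hA 0 (by norm_num) (hk0.mpr (hsm))
    · exact by decide
    · exfalso
      have hsm : pvOri base 5 = base := hsb5.mp hNs
      exact hA 2 (by norm_num) (hk2.mpr (hsm))
    · exfalso
      have hsm : pvOri base 6 = base := hsb6.mp hNs
      exact hA 1 (by norm_num) (hk1.mpr (hswap.mpr hsm))
    · exact by decide

set_option maxHeartbeats 1000000 in
lemma cond_4 (base : List (Int × Int)) (hb : pvNormalise base = base) :
    (PySem.List.min? ((pvD4.filter (fun N => pvImage base N == base)).map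
        (fun N => (((PySem.List.index? pvD4 (pvMul ((-1:Int),(0:Int),(0:Int),(-1:Int)) N)).getD 0 : Nat) : Int))) (fun x => x) == some 4)
    = pvKeep (pvOri base) 4 := by
  have hs0 : (pvImage base ((1:Int),(0:Int),(0:Int),(1:Int)) == base) = true :=
    beq_iff_eq.mpr (by rw [show pvImage base ((1:Int),(0:Int),(0:Int),(1:Int)) = pvOri base 0 from img_eq_ori base 0]; exact ori_zero base hb)
  have hmemj : ((4:Int)) ∈ (pvD4.filter (fun N => pvImage base N == base)).map
      (fun N => (((PySem.List.index? pvD4 (pvMul ((-1:Int),(0:Int),(0:Int),(-1:Int)) N)).getD 0 : Nat) : Int)) :=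
    List.mem_map.2 ⟨((1:Int),(0:Int),(0:Int),(1:Int)), List.mem_filter.2 ⟨by decide, hs0⟩, by decide⟩
  have hsb4 : ((pvImage base ((-1:Int),(0:Int),(0:Int),(-1:Int)) == base) = true) ↔ pvOri base 4 = base := by
    rw [show pvImage base ((-1:Int),(0:Int),(0:Int),(-1:Int)) = pvOri base 4 from img_eq_ori base 4]; exact beq_iff_eq
  have hsb5 : ((pvImage base ((1:Int),(0:Int),(0:Int),(-1:Int)) == base) = true) ↔ pvOri base 5 = base := by
    rw [show pvImage base ((1:Int),(0:Int),(0:Int),(-1:Int)) = pvOri base 5 from img_eq_ori base 5]; exact beq_iff_eq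
  have hsb6 : ((pvImage base ((0:Int),(-1:Int),(1:Int),(0:Int)) == base) = true) ↔ pvOri base 6 = base := by
    rw [show pvImage base ((0:Int),(-1:Int),(1:Int),(0:Int)) = pvOri base 6 from img_eq_ori base 6]; exact beq_iff_eq
  have hsb7 : ((pvImage base ((0:Int),(1:Int),(1:Int),(0:Int)) == base) = true) ↔ pvOri base 7 = base := by
    rw [show pvImage base ((0:Int),(1:Int),(1:Int),(0:Int)) = pvOri base 7 from img_eq_ori base 7]; exact beq_iff_eq
  have hk0 : pvOri base 0 = pvOri base 4 ↔ pvOri base 4 = base :=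
    ori_key base hb 0 0 4 4 (by decide) (by decide) (by decide)
  have hk1 : pvOri base 1 = pvOri base 4 ↔ pvOri base 5 = base :=
    ori_key base hb 1 1 4 5 (by decide) (by decide) (by decide)
  have hk2 : pvOri base 2 = pvOri base 4 ↔ pvOri base 2 = base :=
    ori_key base hb 2 6 4 2 (by decide) (by decide) (by decide)
  have hk3 : pvOri base 3 = pvOri base 4 ↔ pvOri base 7 = base :=
    ori_key base hb 3 3 4 7 (by decide) (by decide) (by decide)
  have hswap := ori_swap base hb
  apply Bool.coe_iff_coe.mp
  rw [beq_iff_eq, min?_int_eq_some_iff_of_mem _ _ hmemj]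
  simp only [pvKeep, decide_eq_true_eq]
  constructor
  · intro hmin i hi
    interval_cases i
    · intro he
      have hsm : pvOri base 4 = base := hk0.mp he
      have hy := hmin ((0:Int)) (List.mem_map.2 ⟨((-1:Int),(0:Int),(0:Int),(-1:Int)),
        List.mem_filter.2 ⟨by decide, hsb4.mpr hsm⟩, by decide⟩)
      exact absurd hy (by decide)
    · intro he
      have hsm : pvOri base 5 = base := hk1.mp he
      have hy := hmin ((1:Int)) (List.mem_map.2 ⟨((1:Int),(0:Int),(0:Int),(-1:Int)),
        List.mem_filter.2 ⟨by decide, hsb5.mpr hsm⟩, by decide⟩)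
      exact absurd hy (by decide)
    · intro he
      have hsm : pvOri base 6 = base := hswap.mp (hk2.mp he)
      have hy := hmin ((2:Int)) (List.mem_map.2 ⟨((0:Int),(-1:Int),(1:Int),(0:Int)),
        List.mem_filter.2 ⟨by decide, hsb6.mpr hsm⟩, by decide⟩)
      exact absurd hy (by decide)
    · intro he
      have hsm : pvOri base 7 = base := hk3.mp he
      have hy := hmin ((3:Int)) (List.mem_map.2 ⟨((0:Int),(1:Int),(1:Int),(0:Int)),
        List.mem_filter.2 ⟨by decide, hsb7.mpr hsm⟩, by decide⟩)
      exact absurd hy (by decide)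
  · intro hA y hy
    rcases List.mem_map.1 hy with ⟨N, hNf, rfl⟩
    have hNd := (List.mem_filter.1 hNf).1
    have hNs := (List.mem_filter.1 hNf).2
    simp only [pvD4, List.mem_cons, List.not_mem_nil, or_false] at hNd
    rcases hNd with rfl | rfl | rfl | rfl | rfl | rfl | rfl | rfl
    · exact by decide
    · exact by decide
    · exact by decide
    · exact by decide
    · exfalso
      have hsm : pvOri base 4 = base := hsb4.mp hNs
      exact hA 0 (by norm_num) (hk0.mpr (hsm))
    · exfalso
      have hsm : pvOri base 5 = base := hsb5.mp hNs
      exact hA 1 (by norm_num) (hk1.mpr (hsm))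
    · exfalso
      have hsm : pvOri base 6 = base := hsb6.mp hNs
      exact hA 2 (by norm_num) (hk2.mpr (hswap.mpr hsm))
    · exfalso
      have hsm : pvOri base 7 = base := hsb7.mp hNs
      exact hA 3 (by norm_num) (hk3.mpr (hsm))

set_option maxHeartbeats 1000000 in
lemma cond_5 (base : List (Int × Int)) (hb : pvNormalise base = base) :
    (PySem.List.min? ((pvD4.filter (fun N => pvImage base N == base)).map
        (fun N => (((PySem.List.index? pvD4 (pvMul ((1:Int),(0:Int),(0:Int),(-1:Int)) N)).getD 0 : Nat) : Int))) (fun x => x) == some 5)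
    = pvKeep (pvOri base) 5 := by
  have hs0 : (pvImage base ((1:Int),(0:Int),(0:Int),(1:Int)) == base) = true :=
    beq_iff_eq.mpr (by rw [show pvImage base ((1:Int),(0:Int),(0:Int),(1:Int)) = pvOri base 0 from img_eq_ori base 0]; exact ori_zero base hb)
  have hmemj : ((5:Int)) ∈ (pvD4.filter (fun N => pvImage base N == base)).map
      (fun N => (((PySem.List.index? pvD4 (pvMul ((1:Int),(0:Int),(0:Int),(-1:Int)) N)).getD 0 : Nat) : Int)) :=
    List.mem_map.2 ⟨((1:Int),(0:Int),(0:Int),(1:Int)), List.mem_filter.2 ⟨by decide, hs0⟩, by decide⟩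
  have hsb1 : ((pvImage base ((-1:Int),(0:Int),(0:Int),(1:Int)) == base) = true) ↔ pvOri base 1 = base := by
    rw [show pvImage base ((-1:Int),(0:Int),(0:Int),(1:Int)) = pvOri base 1 from img_eq_ori base 1]; exact beq_iff_eq
  have hsb4 : ((pvImage base ((-1:Int),(0:Int),(0:Int),(-1:Int)) == base) = true) ↔ pvOri base 4 = base := by
    rw [show pvImage base ((-1:Int),(0:Int),(0:Int),(-1:Int)) = pvOri base 4 from img_eq_ori base 4]; exact beq_iff_eq
  have hsb5 : ((pvImage base ((1:Int),(0:Int),(0:Int),(-1:Int)) == base) = true) ↔ pvOri base 5 = base := by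
    rw [show pvImage base ((1:Int),(0:Int),(0:Int),(-1:Int)) = pvOri base 5 from img_eq_ori base 5]; exact beq_iff_eq
  have hsb6 : ((pvImage base ((0:Int),(-1:Int),(1:Int),(0:Int)) == base) = true) ↔ pvOri base 6 = base := by
    rw [show pvImage base ((0:Int),(-1:Int),(1:Int),(0:Int)) = pvOri base 6 from img_eq_ori base 6]; exact beq_iff_eq
  have hsb7 : ((pvImage base ((0:Int),(1:Int),(1:Int),(0:Int)) == base) = true) ↔ pvOri base 7 = base := by
    rw [show pvImage base ((0:Int),(1:Int),(1:Int),(0:Int)) = pvOri base 7 from img_eq_ori base 7]; exact beq_iff_eq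
  have hk0 : pvOri base 0 = pvOri base 5 ↔ pvOri base 5 = base :=
    ori_key base hb 0 0 5 5 (by decide) (by decide) (by decide)
  have hk1 : pvOri base 1 = pvOri base 5 ↔ pvOri base 4 = base :=
    ori_key base hb 1 1 5 4 (by decide) (by decide) (by decide)
  have hk2 : pvOri base 2 = pvOri base 5 ↔ pvOri base 7 = base :=
    ori_key base hb 2 6 5 7 (by decide) (by decide) (by decide)
  have hk3 : pvOri base 3 = pvOri base 5 ↔ pvOri base 2 = base :=
    ori_key base hb 3 3 5 2 (by decide) (by decide) (by decide)
  have hk4 : pvOri base 4 = pvOri base 5 ↔ pvOri base 1 = base :=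
    ori_key base hb 4 4 5 1 (by decide) (by decide) (by decide)
  have hswap := ori_swap base hb
  apply Bool.coe_iff_coe.mp
  rw [beq_iff_eq, min?_int_eq_some_iff_of_mem _ _ hmemj]
  simp only [pvKeep, decide_eq_true_eq]
  constructor
  · intro hmin i hi
    interval_cases i
    · intro he
      have hsm : pvOri base 5 = base := hk0.mp he
      have hy := hmin ((0:Int)) (List.mem_map.2 ⟨((1:Int),(0:Int),(0:Int),(-1:Int)),
        List.mem_filter.2 ⟨by decide, hsb5.mpr hsm⟩, by decide⟩)
      exact absurd hy (by decide)
    · intro he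
      have hsm : pvOri base 4 = base := hk1.mp he
      have hy := hmin ((1:Int)) (List.mem_map.2 ⟨((-1:Int),(0:Int),(0:Int),(-1:Int)),
        List.mem_filter.2 ⟨by decide, hsb4.mpr hsm⟩, by decide⟩)
      exact absurd hy (by decide)
    · intro he
      have hsm : pvOri base 7 = base := hk2.mp he
      have hy := hmin ((2:Int)) (List.mem_map.2 ⟨((0:Int),(1:Int),(1:Int),(0:Int)),
        List.mem_filter.2 ⟨by decide, hsb7.mpr hsm⟩, by decide⟩)
      exact absurd hy (by decide)
    · intro he
      have hsm : pvOri base 6 = base := hswap.mp (hk3.mp he)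
      have hy := hmin ((3:Int)) (List.mem_map.2 ⟨((0:Int),(-1:Int),(1:Int),(0:Int)),
        List.mem_filter.2 ⟨by decide, hsb6.mpr hsm⟩, by decide⟩)
      exact absurd hy (by decide)
    · intro he
      have hsm : pvOri base 1 = base := hk4.mp he
      have hy := hmin ((4:Int)) (List.mem_map.2 ⟨((-1:Int),(0:Int),(0:Int),(1:Int)),
        List.mem_filter.2 ⟨by decide, hsb1.mpr hsm⟩, by decide⟩)
      exact absurd hy (by decide)
  · intro hA y hy
    rcases List.mem_map.1 hy with ⟨N, hNf, rfl⟩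
    have hNd := (List.mem_filter.1 hNf).1
    have hNs := (List.mem_filter.1 hNf).2
    simp only [pvD4, List.mem_cons, List.not_mem_nil, or_false] at hNd
    rcases hNd with rfl | rfl | rfl | rfl | rfl | rfl | rfl | rfl
    · exact by decide
    · exfalso
      have hsm : pvOri base 1 = base := hsb1.mp hNs
      exact hA 4 (by norm_num) (hk4.mpr (hsm))
    · exact by decide
    · exact by decide
    · exfalso
      have hsm : pvOri base 4 = base := hsb4.mp hNs
      exact hA 1 (by norm_num) (hk1.mpr (hsm))
    · exfalso
      have hsm : pvOri base 5 = base := hsb5.mp hNs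
      exact hA 0 (by norm_num) (hk0.mpr (hsm))
    · exfalso
      have hsm : pvOri base 6 = base := hsb6.mp hNs
      exact hA 3 (by norm_num) (hk3.mpr (hswap.mpr hsm))
    · exfalso
      have hsm : pvOri base 7 = base := hsb7.mp hNs
      exact hA 2 (by norm_num) (hk2.mpr (hsm))

set_option maxHeartbeats 1000000 in
lemma cond_6 (base : List (Int × Int)) (hb : pvNormalise base = base) :
    (PySem.List.min? ((pvD4.filter (fun N => pvImage base N == base)).map
        (fun N => (((PySem.List.index? pvD4 (pvMul ((0:Int),(-1:Int),(1:Int),(0:Int)) N)).getD 0 : Nat) : Int))) (fun x => x) == some 6)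
    = pvKeep (pvOri base) 6 := by
  have hs0 : (pvImage base ((1:Int),(0:Int),(0:Int),(1:Int)) == base) = true :=
    beq_iff_eq.mpr (by rw [show pvImage base ((1:Int),(0:Int),(0:Int),(1:Int)) = pvOri base 0 from img_eq_ori base 0]; exact ori_zero base hb)
  have hmemj : ((6:Int)) ∈ (pvD4.filter (fun N => pvImage base N == base)).map
      (fun N => (((PySem.List.index? pvD4 (pvMul ((0:Int),(-1:Int),(1:Int),(0:Int)) N)).getD 0 : Nat) : Int)) :=
    List.mem_map.2 ⟨((1:Int),(0:Int),(0:Int),(1:Int)), List.mem_filter.2 ⟨by decide, hs0⟩, by decide⟩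
  have hsb1 : ((pvImage base ((-1:Int),(0:Int),(0:Int),(1:Int)) == base) = true) ↔ pvOri base 1 = base := by
    rw [show pvImage base ((-1:Int),(0:Int),(0:Int),(1:Int)) = pvOri base 1 from img_eq_ori base 1]; exact beq_iff_eq
  have hsb2 : ((pvImage base ((0:Int),(1:Int),(-1:Int),(0:Int)) == base) = true) ↔ pvOri base 2 = base := by
    rw [show pvImage base ((0:Int),(1:Int),(-1:Int),(0:Int)) = pvOri base 2 from img_eq_ori base 2]; exact beq_iff_eq
  have hsb3 : ((pvImage base ((0:Int),(-1:Int),(-1:Int),(0:Int)) == base) = true) ↔ pvOri base 3 = base := by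
    rw [show pvImage base ((0:Int),(-1:Int),(-1:Int),(0:Int)) = pvOri base 3 from img_eq_ori base 3]; exact beq_iff_eq
  have hsb4 : ((pvImage base ((-1:Int),(0:Int),(0:Int),(-1:Int)) == base) = true) ↔ pvOri base 4 = base := by
    rw [show pvImage base ((-1:Int),(0:Int),(0:Int),(-1:Int)) = pvOri base 4 from img_eq_ori base 4]; exact beq_iff_eq
  have hsb6 : ((pvImage base ((0:Int),(-1:Int),(1:Int),(0:Int)) == base) = true) ↔ pvOri base 6 = base := by
    rw [show pvImage base ((0:Int),(-1:Int),(1:Int),(0:Int)) = pvOri base 6 from img_eq_ori base 6]; exact beq_iff_eq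
  have hsb7 : ((pvImage base ((0:Int),(1:Int),(1:Int),(0:Int)) == base) = true) ↔ pvOri base 7 = base := by
    rw [show pvImage base ((0:Int),(1:Int),(1:Int),(0:Int)) = pvOri base 7 from img_eq_ori base 7]; exact beq_iff_eq
  have hk0 : pvOri base 0 = pvOri base 6 ↔ pvOri base 6 = base :=
    ori_key base hb 0 0 6 6 (by decide) (by decide) (by decide)
  have hk1 : pvOri base 1 = pvOri base 6 ↔ pvOri base 7 = base :=
    ori_key base hb 1 1 6 7 (by decide) (by decide) (by decide)
  have hk2 : pvOri base 2 = pvOri base 6 ↔ pvOri base 4 = base :=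
    ori_key base hb 2 6 6 4 (by decide) (by decide) (by decide)
  have hk3 : pvOri base 3 = pvOri base 6 ↔ pvOri base 1 = base :=
    ori_key base hb 3 3 6 1 (by decide) (by decide) (by decide)
  have hk4 : pvOri base 4 = pvOri base 6 ↔ pvOri base 2 = base :=
    ori_key base hb 4 4 6 2 (by decide) (by decide) (by decide)
  have hk5 : pvOri base 5 = pvOri base 6 ↔ pvOri base 3 = base :=
    ori_key base hb 5 5 6 3 (by decide) (by decide) (by decide)
  apply Bool.coe_iff_coe.mp
  rw [beq_iff_eq, min?_int_eq_some_iff_of_mem _ _ hmemj]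
  simp only [pvKeep, decide_eq_true_eq]
  constructor
  · intro hmin i hi
    interval_cases i
    · intro he
      have hsm : pvOri base 6 = base := hk0.mp he
      have hy := hmin ((4:Int)) (List.mem_map.2 ⟨((0:Int),(-1:Int),(1:Int),(0:Int)),
        List.mem_filter.2 ⟨by decide, hsb6.mpr hsm⟩, by decide⟩)
      exact absurd hy (by decide)
    · intro he
      have hsm : pvOri base 7 = base := hk1.mp he
      have hy := hmin ((1:Int)) (List.mem_map.2 ⟨((0:Int),(1:Int),(1:Int),(0:Int)),
        List.mem_filter.2 ⟨by decide, hsb7.mpr hsm⟩, by decide⟩)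
      exact absurd hy (by decide)
    · intro he
      have hsm : pvOri base 4 = base := hk2.mp he
      have hy := hmin ((2:Int)) (List.mem_map.2 ⟨((-1:Int),(0:Int),(0:Int),(-1:Int)),
        List.mem_filter.2 ⟨by decide, hsb4.mpr hsm⟩, by decide⟩)
      exact absurd hy (by decide)
    · intro he
      have hsm : pvOri base 1 = base := hk3.mp he
      have hy := hmin ((3:Int)) (List.mem_map.2 ⟨((-1:Int),(0:Int),(0:Int),(1:Int)),
        List.mem_filter.2 ⟨by decide, hsb1.mpr hsm⟩, by decide⟩)
      exact absurd hy (by decide)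
    · intro he
      have hsm : pvOri base 2 = base := hk4.mp he
      have hy := hmin ((0:Int)) (List.mem_map.2 ⟨((0:Int),(1:Int),(-1:Int),(0:Int)),
        List.mem_filter.2 ⟨by decide, hsb2.mpr hsm⟩, by decide⟩)
      exact absurd hy (by decide)
    · intro he
      have hsm : pvOri base 3 = base := hk5.mp he
      have hy := hmin ((5:Int)) (List.mem_map.2 ⟨((0:Int),(-1:Int),(-1:Int),(0:Int)),
        List.mem_filter.2 ⟨by decide, hsb3.mpr hsm⟩, by decide⟩)
      exact absurd hy (by decide)
  · intro hA y hy
    rcases List.mem_map.1 hy with ⟨N, hNf, rfl⟩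
    have hNd := (List.mem_filter.1 hNf).1
    have hNs := (List.mem_filter.1 hNf).2
    simp only [pvD4, List.mem_cons, List.not_mem_nil, or_false] at hNd
    rcases hNd with rfl | rfl | rfl | rfl | rfl | rfl | rfl | rfl
    · exact by decide
    · exfalso
      have hsm : pvOri base 1 = base := hsb1.mp hNs
      exact hA 3 (by norm_num) (hk3.mpr (hsm))
    · exfalso
      have hsm : pvOri base 2 = base := hsb2.mp hNs
      exact hA 4 (by norm_num) (hk4.mpr (hsm))
    · exfalso
      have hsm : pvOri base 3 = base := hsb3.mp hNs
      exact hA 5 (by norm_num) (hk5.mpr (hsm))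
    · exfalso
      have hsm : pvOri base 4 = base := hsb4.mp hNs
      exact hA 2 (by norm_num) (hk2.mpr (hsm))
    · exact by decide
    · exfalso
      have hsm : pvOri base 6 = base := hsb6.mp hNs
      exact hA 0 (by norm_num) (hk0.mpr (hsm))
    · exfalso
      have hsm : pvOri base 7 = base := hsb7.mp hNs
      exact hA 1 (by norm_num) (hk1.mpr (hsm))

set_option maxHeartbeats 1000000 in
lemma cond_7 (base : List (Int × Int)) (hb : pvNormalise base = base) :
    (PySem.List.min? ((pvD4.filter (fun N => pvImage base N == base)).map
        (fun N => (((PySem.List.index? pvD4 (pvMul ((0:Int),(1:Int),(1:Int),(0:Int)) N)).getD 0 : Nat) : Int))) (fun x => x) == some 7)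
    = pvKeep (pvOri base) 7 := by
  have hs0 : (pvImage base ((1:Int),(0:Int),(0:Int),(1:Int)) == base) = true :=
    beq_iff_eq.mpr (by rw [show pvImage base ((1:Int),(0:Int),(0:Int),(1:Int)) = pvOri base 0 from img_eq_ori base 0]; exact ori_zero base hb)
  have hmemj : ((7:Int)) ∈ (pvD4.filter (fun N => pvImage base N == base)).map
      (fun N => (((PySem.List.index? pvD4 (pvMul ((0:Int),(1:Int),(1:Int),(0:Int)) N)).getD 0 : Nat) : Int)) :=
    List.mem_map.2 ⟨((1:Int),(0:Int),(0:Int),(1:Int)), List.mem_filter.2 ⟨by decide, hs0⟩, by decide⟩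
  have hsb1 : ((pvImage base ((-1:Int),(0:Int),(0:Int),(1:Int)) == base) = true) ↔ pvOri base 1 = base := by
    rw [show pvImage base ((-1:Int),(0:Int),(0:Int),(1:Int)) = pvOri base 1 from img_eq_ori base 1]; exact beq_iff_eq
  have hsb2 : ((pvImage base ((0:Int),(1:Int),(-1:Int),(0:Int)) == base) = true) ↔ pvOri base 2 = base := by
    rw [show pvImage base ((0:Int),(1:Int),(-1:Int),(0:Int)) = pvOri base 2 from img_eq_ori base 2]; exact beq_iff_eq
  have hsb3 : ((pvImage base ((0:Int),(-1:Int),(-1:Int),(0:Int)) == base) = true) ↔ pvOri base 3 = base := by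
    rw [show pvImage base ((0:Int),(-1:Int),(-1:Int),(0:Int)) = pvOri base 3 from img_eq_ori base 3]; exact beq_iff_eq
  have hsb4 : ((pvImage base ((-1:Int),(0:Int),(0:Int),(-1:Int)) == base) = true) ↔ pvOri base 4 = base := by
    rw [show pvImage base ((-1:Int),(0:Int),(0:Int),(-1:Int)) = pvOri base 4 from img_eq_ori base 4]; exact beq_iff_eq
  have hsb5 : ((pvImage base ((1:Int),(0:Int),(0:Int),(-1:Int)) == base) = true) ↔ pvOri base 5 = base := by
    rw [show pvImage base ((1:Int),(0:Int),(0:Int),(-1:Int)) = pvOri base 5 from img_eq_ori base 5]; exact beq_iff_eq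
  have hsb6 : ((pvImage base ((0:Int),(-1:Int),(1:Int),(0:Int)) == base) = true) ↔ pvOri base 6 = base := by
    rw [show pvImage base ((0:Int),(-1:Int),(1:Int),(0:Int)) = pvOri base 6 from img_eq_ori base 6]; exact beq_iff_eq
  have hsb7 : ((pvImage base ((0:Int),(1:Int),(1:Int),(0:Int)) == base) = true) ↔ pvOri base 7 = base := by
    rw [show pvImage base ((0:Int),(1:Int),(1:Int),(0:Int)) = pvOri base 7 from img_eq_ori base 7]; exact beq_iff_eq
  have hk0 : pvOri base 0 = pvOri base 7 ↔ pvOri base 7 = base :=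
    ori_key base hb 0 0 7 7 (by decide) (by decide) (by decide)
  have hk1 : pvOri base 1 = pvOri base 7 ↔ pvOri base 6 = base :=
    ori_key base hb 1 1 7 6 (by decide) (by decide) (by decide)
  have hk2 : pvOri base 2 = pvOri base 7 ↔ pvOri base 1 = base :=
    ori_key base hb 2 6 7 1 (by decide) (by decide) (by decide)
  have hk3 : pvOri base 3 = pvOri base 7 ↔ pvOri base 4 = base :=
    ori_key base hb 3 3 7 4 (by decide) (by decide) (by decide)
  have hk4 : pvOri base 4 = pvOri base 7 ↔ pvOri base 3 = base :=
    ori_key base hb 4 4 7 3 (by decide) (by decide) (by decide)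
  have hk5 : pvOri base 5 = pvOri base 7 ↔ pvOri base 2 = base :=
    ori_key base hb 5 5 7 2 (by decide) (by decide) (by decide)
  have hk6 : pvOri base 6 = pvOri base 7 ↔ pvOri base 5 = base :=
    ori_key base hb 6 2 7 5 (by decide) (by decide) (by decide)
  apply Bool.coe_iff_coe.mp
  rw [beq_iff_eq, min?_int_eq_some_iff_of_mem _ _ hmemj]
  simp only [pvKeep, decide_eq_true_eq]
  constructor
  · intro hmin i hi
    interval_cases i
    · intro he
      have hsm : pvOri base 7 = base := hk0.mp he
      have hy := hmin ((0:Int)) (List.mem_map.2 ⟨((0:Int),(1:Int),(1:Int),(0:Int)),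
        List.mem_filter.2 ⟨by decide, hsb7.mpr hsm⟩, by decide⟩)
      exact absurd hy (by decide)
    · intro he
      have hsm : pvOri base 6 = base := hk1.mp he
      have hy := hmin ((5:Int)) (List.mem_map.2 ⟨((0:Int),(-1:Int),(1:Int),(0:Int)),
        List.mem_filter.2 ⟨by decide, hsb6.mpr hsm⟩, by decide⟩)
      exact absurd hy (by decide)
    · intro he
      have hsm : pvOri base 1 = base := hk2.mp he
      have hy := hmin ((2:Int)) (List.mem_map.2 ⟨((-1:Int),(0:Int),(0:Int),(1:Int)),
        List.mem_filter.2 ⟨by decide, hsb1.mpr hsm⟩, by decide⟩)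
      exact absurd hy (by decide)
    · intro he
      have hsm : pvOri base 4 = base := hk3.mp he
      have hy := hmin ((3:Int)) (List.mem_map.2 ⟨((-1:Int),(0:Int),(0:Int),(-1:Int)),
        List.mem_filter.2 ⟨by decide, hsb4.mpr hsm⟩, by decide⟩)
      exact absurd hy (by decide)
    · intro he
      have hsm : pvOri base 3 = base := hk4.mp he
      have hy := hmin ((4:Int)) (List.mem_map.2 ⟨((0:Int),(-1:Int),(-1:Int),(0:Int)),
        List.mem_filter.2 ⟨by decide, hsb3.mpr hsm⟩, by decide⟩)
      exact absurd hy (by decide)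
    · intro he
      have hsm : pvOri base 2 = base := hk5.mp he
      have hy := hmin ((1:Int)) (List.mem_map.2 ⟨((0:Int),(1:Int),(-1:Int),(0:Int)),
        List.mem_filter.2 ⟨by decide, hsb2.mpr hsm⟩, by decide⟩)
      exact absurd hy (by decide)
    · intro he
      have hsm : pvOri base 5 = base := hk6.mp he
      have hy := hmin ((6:Int)) (List.mem_map.2 ⟨((1:Int),(0:Int),(0:Int),(-1:Int)),
        List.mem_filter.2 ⟨by decide, hsb5.mpr hsm⟩, by decide⟩)
      exact absurd hy (by decide)
  · intro hA y hy
    rcases List.mem_map.1 hy with ⟨N, hNf, rfl⟩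
    have hNd := (List.mem_filter.1 hNf).1
    have hNs := (List.mem_filter.1 hNf).2
    simp only [pvD4, List.mem_cons, List.not_mem_nil, or_false] at hNd
    rcases hNd with rfl | rfl | rfl | rfl | rfl | rfl | rfl | rfl
    · exact by decide
    · exfalso
      have hsm : pvOri base 1 = base := hsb1.mp hNs
      exact hA 2 (by norm_num) (hk2.mpr (hsm))
    · exfalso
      have hsm : pvOri base 2 = base := hsb2.mp hNs
      exact hA 5 (by norm_num) (hk5.mpr (hsm))
    · exfalso
      have hsm : pvOri base 3 = base := hsb3.mp hNs
      exact hA 4 (by norm_num) (hk4.mpr (hsm))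
    · exfalso
      have hsm : pvOri base 4 = base := hsb4.mp hNs
      exact hA 3 (by norm_num) (hk3.mpr (hsm))
    · exfalso
      have hsm : pvOri base 5 = base := hsb5.mp hNs
      exact hA 6 (by norm_num) (hk6.mpr (hsm))
    · exfalso
      have hsm : pvOri base 6 = base := hsb6.mp hNs
      exact hA 1 (by norm_num) (hk1.mpr (hsm))
    · exfalso
      have hsm : pvOri base 7 = base := hsb7.mp hNs
      exact hA 0 (by norm_num) (hk0.mpr (hsm))

-- ===== VERDICT (by name: the statement is the Claim_ definition above) =====
set_option maxHeartbeats 4000000 in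
theorem orientations_py_spec : Claim_equal_orientations_py := by
  intro cells _
  unfold Spec_orientations_py orientations_py orientations_py_alt
  dsimp only []
  have hb : pvNormalise (pvNormalise cells) = pvNormalise cells := norm_idem cells
  have hA := (coreA_eq (pvNormalise cells)).trans (dedup_eq (pvOri (pvNormalise cells)) 8)
  rw [hA, PySem.List.foldl_append_if]
  rw [show PySem.List.enumerate pvD4
        = (List.range 8).map (fun j : Nat => ((j : Int), pvD4.getD j pvE)) from by decide]
  rw [List.filter_map, List.map_map, List.nil_append]
  have hfil : List.filter ((fun jM : Int × (Int × Int × Int × Int) =>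
        PySem.List.min?
          ((pvD4.filter (fun N => pvImage (pvNormalise cells) N == pvNormalise cells)).map
            (fun N => (((PySem.List.index? pvD4 (pvMul jM.2 N)).getD 0 : Nat) : Int)))
          (fun x => x) == some jM.1) ∘ (fun j : Nat => ((j : Int), pvD4.getD j pvE)))
        (List.range 8)
      = List.filter (fun j => pvKeep (pvOri (pvNormalise cells)) j) (List.range 8) := by
    apply List.filter_congr
    intro j hj
    have hj8 : j < 8 := List.mem_range.1 hj
    interval_cases j
    · exact cond_0 (pvNormalise cells) hb
    · exact cond_1 (pvNormalise cells) hb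
    · exact cond_2 (pvNormalise cells) hb
    · exact cond_3 (pvNormalise cells) hb
    · exact cond_4 (pvNormalise cells) hb
    · exact cond_5 (pvNormalise cells) hb
    · exact cond_6 (pvNormalise cells) hb
    · exact cond_7 (pvNormalise cells) hb
  rw [hfil]
  apply List.map_congr_left
  intro j hj
  exact (img_eq_ori (pvNormalise cells) j).symm
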